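-- pv_equiv track=rewrite | github.com/isyourhand/20260306-logistic-excel-to-db | normalize_rates_to_pg.py | expand_header_row
-- ===== SOURCE A (Python) =====
-- def normalize_text(s: str) -> str:
--     return s.replace("\n", " ").replace("\r", " ").strip()
--
-- def expand_header_row(row: list[str], width: int) -> list[str]:
--     expanded: list[str] = []
--     last = ""
--     for idx in range(width):
--         value = normalize_text(row[idx]) if idx < len(row) else ""
--         if value:
--             last = value
--         expanded.append(last)
--     return expanded
-- ===== SOURCE B (Python) =====
-- def normalize_text(s: str) -> str:
--     return s.replace("\n", " ").replace("\r", " ").strip()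
--
-- def expand_header_row(row: list[str], width: int) -> list[str]:
--     w = max(width, 0)
--     normalized = [normalize_text(c) for c in row[:w]]
--     anchors = [(i, v) for i, v in enumerate(normalized) if v]
--     out: list[str] = []
--     pos, val = 0, ""
--     for i, v in anchors:
--         out += [val] * (i - pos)
--         pos, val = i, v
--     out += [val] * (w - pos)
--     return out
-- ===== Notes on version B (the rewrite author's own statement) =====
-- stated objective: alternative
-- what changed: Instead of a per-cell scan carrying a `last` variable, B first collects the (index, value) anchor positions of the non-empty normalized cells and then builds the output as concatenated constant runs via list replication between consecutive anchors.
import Mathlib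
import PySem

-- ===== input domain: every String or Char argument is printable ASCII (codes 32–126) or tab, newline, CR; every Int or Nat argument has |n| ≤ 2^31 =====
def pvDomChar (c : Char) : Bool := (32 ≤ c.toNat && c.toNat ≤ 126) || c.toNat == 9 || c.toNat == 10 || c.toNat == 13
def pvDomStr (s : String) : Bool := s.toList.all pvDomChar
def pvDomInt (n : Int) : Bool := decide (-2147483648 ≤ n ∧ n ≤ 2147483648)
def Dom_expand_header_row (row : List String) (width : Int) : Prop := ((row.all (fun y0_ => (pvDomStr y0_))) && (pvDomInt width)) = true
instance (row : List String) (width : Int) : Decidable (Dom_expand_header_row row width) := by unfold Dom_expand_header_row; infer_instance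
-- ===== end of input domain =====

-- B replaces A's per-cell forward scan (carrying `last`) with an anchor/run construction: it collects
-- the positions of the non-empty normalized cells and emits the output as replicated constant runs
-- between consecutive anchors; same asymptotic cost, genuinely different construction.

-- ===== PORT A =====
-- shared helper: normalize_text(s) = s.replace("\n"," ").replace("\r"," ").strip()
def normalize_text (s : String) : String :=
  PySem.Str.strip (PySem.Str.replace (PySem.Str.replace s "\n" " ") "\r" " ")

def expand_header_row (row : List String) (width : Int) : List String :=
  -- expanded = []; last = ""; for idx in range(width): ... ; return expanded
  (PySem.List.pyRange 0 width 1).foldl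
    (fun (st : List String × String) idx =>
      let value : String :=
        if idx < (row.length : Int) then normalize_text ((PySem.List.pyGet? row idx).getD "") else ""
      let last := if value ≠ "" then value else st.2
      (st.1 ++ [last], last))
    ([], "") |>.1

-- ===== PORT B =====
def expand_header_row_alt (row : List String) (width : Int) : List String :=
  -- w = max(width, 0)
  let w : Int := max width 0
  -- normalized = [normalize_text(c) for c in row[:w]]
  let normalized : List String := (PySem.List.slice row none (some w)).map normalize_text
  -- anchors = [(i, v) for i, v in enumerate(normalized) if v]
  let anchors : List (Int × String) := (PySem.List.enumerate normalized 0).filter (fun p => p.2 ≠ "")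
  -- out = []; pos, val = 0, ""; for i, v in anchors: out += [val]*(i-pos); pos, val = i, v
  let st : List String × Int × String := anchors.foldl
    (fun (st : List String × Int × String) p =>
      (st.1 ++ List.replicate (p.1 - st.2.1).toNat st.2.2, p.1, p.2))
    ([], 0, "")
  -- out += [val] * (w - pos)
  st.1 ++ List.replicate (w - st.2.1).toNat st.2.2

-- ===== PRECONDITION & SPEC =====
def Spec_expand_header_row (row : List String) (width : Int) (out : List String) : Prop := out = expand_header_row_alt row width
instance (row : List String) (width : Int) (out : List String) : Decidable (Spec_expand_header_row row width out) := by unfold Spec_expand_header_row; infer_instance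

-- ===== CLAIM (what is proved, stated in full; the proofs are below) =====
def Claim_equal_expand_header_row : Prop := ∀ (row : List String) (width : Int), Dom_expand_header_row row width → Spec_expand_header_row row width (expand_header_row row width)

-- ===== LEMMAS AND PROOFS =====

-- the canonical forward-fill: carry `last`, emit the carried value at every cell
def fillFrom (last : String) : List String → List String
  | [] => []
  | x :: xs =>
    let l := if x ≠ "" then x else last
    l :: fillFrom l xs

-- the value carried after processing l starting from val
def carry (val : String) (l : List String) : String :=
  l.foldl (fun a x => if x ≠ "" then x else a) val

-- A's fold computes acc ++ fillFrom last over the mapped values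
theorem foldA_eq_fillFrom (g : Int → String) (L : List Int) (acc : List String) (last : String) :
    (L.foldl (fun (st : List String × String) idx =>
        let value := g idx
        let last := if value ≠ "" then value else st.2
        (st.1 ++ [last], last)) (acc, last)).1
      = acc ++ fillFrom last (L.map g) := by
  induction L generalizing acc last with
  | nil => simp [fillFrom]
  | cons i L ih =>
    simp only [List.foldl_cons, List.map_cons, fillFrom]
    rw [ih]
    simp

-- fillFrom distributes over append, the second part starting from the carried value
theorem fillFrom_append (val : String) (l₁ l₂ : List String) :
    fillFrom val (l₁ ++ l₂) = fillFrom val l₁ ++ fillFrom (carry val l₁) l₂ := by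
  induction l₁ generalizing val with
  | nil => simp [fillFrom, carry]
  | cons x xs ih => simp [fillFrom, carry, ih]

-- filling a run of empty cells repeats the carried value
theorem fillFrom_replicate_empty (val : String) (n : Nat) :
    fillFrom val (List.replicate n "") = List.replicate n val := by
  induction n with
  | zero => simp [fillFrom]
  | succ n ih => simp [List.replicate_succ, fillFrom, ih]

-- the cells A feeds into its fill: padded lookup over range(width) = normalized prefix ++ "" padding
theorem mapg_eq (row : List String) (n : Nat) :
    (List.range n).map ((fun idx : Int => if idx < (row.length : Int)
        then normalize_text ((PySem.List.pyGet? row idx).getD "") else "") ∘ (fun k : Nat => (k : Int)))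
      = (row.take n).map normalize_text ++ List.replicate (n - row.length) "" := by
  induction n with
  | zero => simp
  | succ n ih =>
    rw [List.range_succ, List.map_append, ih]
    by_cases h : n < row.length
    · have h1 : (n : Int) < (row.length : Int) := by exact_mod_cast h
      have h2 : n + 1 - row.length = 0 := by omega
      have h3 : n - row.length = 0 := by omega
      rw [h2, h3, List.take_add_one, List.getElem?_eq_getElem h]
      simp [Function.comp, h1]
      rw [List.take_add_one]
      simp [h]
    · have h1 : ¬ ((n : Int) < (row.length : Int)) := by
        intro hc; exact h (by exact_mod_cast hc)
      have h2 : n + 1 - row.length = (n - row.length) + 1 := by omega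
      have h3 : row.take (n+1) = row.take n := by
        rw [List.take_of_length_le (by omega), List.take_of_length_le (by omega)]
      rw [h2, List.replicate_succ' ]
      simp [Function.comp, h1, h3]

-- B's anchors fold, closed with its final replicate, is exactly the forward fill
theorem anchors_fold (l : List String) (k : Int) (acc : List String) (pos : Int) (val : String)
    (hpos : pos ≤ k) (m : Int) (hm : k + l.length ≤ m) :
    (let R := ((PySem.List.enumerate l k).filter (fun p => p.2 ≠ "")).foldl
        (fun (st : List String × Int × String) p =>
          (st.1 ++ List.replicate (p.1 - st.2.1).toNat st.2.2, p.1, p.2)) (acc, pos, val)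
     R.1 ++ List.replicate (m - R.2.1).toNat R.2.2)
      = acc ++ List.replicate (k - pos).toNat val ++ fillFrom val l
          ++ List.replicate (m - (k + l.length)).toNat (carry val l) := by
  induction l generalizing k acc pos val with
  | nil =>
    simp only [PySem.List.enumerate_nil, List.filter_nil, List.foldl_nil, fillFrom, carry,
      List.length_nil, Nat.cast_zero, List.foldl_nil, List.append_nil]
    have : (m - pos).toNat = (k - pos).toNat + (m - (k + 0)).toNat := by omega
    rw [this, List.replicate_add, List.append_assoc]
  | cons x xs ih =>
    rw [PySem.List.enumerate_cons]
    by_cases hx : x = ""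
    · subst hx
      simp only [List.filter_cons, decide_eq_true_eq]
      rw [if_neg (by simp)]
      rw [ih (k + 1) acc pos val (by omega) (by simp at hm ⊢; omega)]
      have hfill : fillFrom val ("" :: xs) = val :: fillFrom val xs := by simp [fillFrom]
      have hcarry : carry val ("" :: xs) = carry val xs := by simp [carry]
      rw [hfill, hcarry]
      have : (k + 1 - pos).toNat = (k - pos).toNat + 1 := by omega
      rw [this, List.replicate_succ']
      have hlen : (m - (k + 1 + (xs.length : Int))) = (m - (k + (("" :: xs).length : Int))) := by
        simp; omega
      rw [hlen]
      simp
    · simp only [List.filter_cons, decide_eq_true_eq]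
      rw [if_pos (by simpa using hx)]
      simp only [List.foldl_cons]
      rw [ih (k + 1) (acc ++ List.replicate (k - pos).toNat val) k x (by omega)
        (by simp at hm ⊢; omega)]
      have hfill : fillFrom val (x :: xs) = x :: fillFrom x xs := by simp [fillFrom, hx]
      have hcarry : carry val (x :: xs) = carry x xs := by simp [carry, hx]
      rw [hfill, hcarry]
      have h1 : (k + 1 - k).toNat = 1 := by omega
      rw [h1]
      have hlen : (m - (k + 1 + (xs.length : Int))) = (m - (k + ((x :: xs).length : Int))) := by
        simp; omega
      rw [hlen]
      simp [List.replicate_one]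

-- ===== VERDICT (by name: the statement is the Claim_ definition above) =====
theorem expand_header_row_spec : Claim_equal_expand_header_row := by
  intro row width _
  unfold Spec_expand_header_row expand_header_row expand_header_row_alt
  dsimp only
  -- A side
  rw [foldA_eq_fillFrom]
  rw [PySem.List.pyRange_one]
  have hsub : ((width : Int) - 0).toNat = width.toNat := by omega
  rw [hsub, List.map_map]
  simp only [zero_add]
  rw [mapg_eq row width.toNat]
  -- B side
  have hw0 : (0 : Int) ≤ max width 0 := le_max_right _ _
  have hwN : (max width 0).toNat = width.toNat := by omega
  rw [PySem.List.slice_to row hw0, hwN]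
  set N : List String := (row.take width.toNat).map normalize_text with hN
  have hNlen : N.length = min width.toNat row.length := by simp [hN]
  rw [anchors_fold N 0 [] 0 "" (le_refl 0) (max width 0) (by rw [hNlen]; omega)]
  -- combine
  rw [fillFrom_append, fillFrom_replicate_empty]
  have h0 : ((0 : Int) - 0).toNat = 0 := by omega
  rw [h0]
  have hpad : (max width 0 - ((0 : Int) + (N.length : Int))).toNat = width.toNat - row.length := by
    rw [hNlen]; omega
  rw [hpad]
  simp
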